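-- pv_equiv track=rewrite | github.com/TkskKurumi/EHPY | misc.py | legalize_path
-- ===== SOURCE A (Python) =====
-- def legalize_path(pth, replace_dir_split = False):
--     pth = pth.replace('"', "'").replace("<", "[").replace(">", "]")
--     if(replace_dir_split):
--         for i in "\\/":
--             pth = pth.replace(i, "_")
--     for i in r':*?|':
--         pth = pth.replace(i, "_")
--     # pth = pth.join(work_pth, 'downloads', '%s-%s' % (self.gid, title))
--     return pth
-- ===== SOURCE B (Python) =====
-- def legalize_path(pth, replace_dir_split=False):
--     table = {'"': "'", '<': '[', '>': ']', ':': '_', '*': '_', '?': '_', '|': '_'}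
--     if replace_dir_split:
--         table['\\'] = '_'
--         table['/'] = '_'
--     return ''.join(table.get(c, c) for c in pth)
-- ===== Notes on version B (the rewrite author's own statement) =====
-- stated objective: idiomatic
-- what changed: Replaces A's seven (or nine) sequential full-string .replace scans by building one char-to-char translation table once and producing the result in a single character-wise pass with a dict lookup.
import Mathlib
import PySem

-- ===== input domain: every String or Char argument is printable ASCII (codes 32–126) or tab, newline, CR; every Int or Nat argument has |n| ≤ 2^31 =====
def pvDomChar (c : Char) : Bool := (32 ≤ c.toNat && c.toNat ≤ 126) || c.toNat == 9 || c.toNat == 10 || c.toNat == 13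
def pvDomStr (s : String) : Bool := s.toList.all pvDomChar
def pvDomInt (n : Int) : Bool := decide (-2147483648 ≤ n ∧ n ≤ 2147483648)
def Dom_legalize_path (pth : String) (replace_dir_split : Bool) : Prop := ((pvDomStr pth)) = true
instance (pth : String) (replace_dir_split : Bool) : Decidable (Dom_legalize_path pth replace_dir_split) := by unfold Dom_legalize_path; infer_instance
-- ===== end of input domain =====

-- B builds one char-to-char translation table and rewrites the string in a single pass
-- (instead of A's sequential full-string .replace scans); objective: idiomatic.


-- ===== PORT A =====
def legalize_path (pth : String) (replace_dir_split : Bool) : String :=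
  let pth1 := PySem.Str.replace (PySem.Str.replace (PySem.Str.replace pth "\"" "'") "<" "[") ">" "]"
  let pth2 := if replace_dir_split then
      ("\\/".toList).foldl (fun p i => PySem.Str.replace p (String.ofList [i]) "_") pth1
    else pth1
  (":*?|".toList).foldl (fun p i => PySem.Str.replace p (String.ofList [i]) "_") pth2

-- ===== PORT B =====
def legalize_path_alt (pth : String) (replace_dir_split : Bool) : String :=
  let table : PySem.Dict Char Char :=
    ((((((((⟨[]⟩ : PySem.Dict Char Char).insert '"' '\'').insert '<' '[').insert '>' ']').insert ':' '_').insert '*' '_').insert '?' '_').insert '|' '_')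
  let table := if replace_dir_split then (table.insert '\\' '_').insert '/' '_' else table
  String.ofList (pth.toList.map (fun c => table.getD c c))

-- ===== PRECONDITION & SPEC =====
def Spec_legalize_path (pth : String) (replace_dir_split : Bool) (out : String) : Prop := out = legalize_path_alt pth replace_dir_split
instance (pth : String) (replace_dir_split : Bool) (out : String) : Decidable (Spec_legalize_path pth replace_dir_split out) := by unfold Spec_legalize_path; infer_instance

-- ===== CLAIM (what is proved, stated in full; the proofs are below) =====
def Claim_equal_legalize_path : Prop := ∀ (pth : String) (replace_dir_split : Bool), Dom_legalize_path pth replace_dir_split → Spec_legalize_path pth replace_dir_split (legalize_path pth replace_dir_split)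

-- ===== LEMMAS AND PROOFS =====

-- replace with a single-character pattern is a character-wise map
lemma go_single (o n : Char) : ∀ (l : List Char) (fuel : Nat) (acc : List Char), l.length ≤ fuel →
    PySem.Chars.replace.go [o] [n] fuel l acc
      = acc.reverse ++ l.map (fun c => if c = o then n else c) := by
  intro l
  induction l with
  | nil =>
    intro fuel acc _
    cases fuel <;> simp [PySem.Chars.replace.go]
  | cons c t ih =>
    intro fuel acc h
    cases fuel with
    | zero => simp at h
    | succ f =>
      by_cases hc : c = o
      · subst hc
        rw [show PySem.Chars.replace.go [c] [n] (f+1) (c :: t) acc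
              = PySem.Chars.replace.go [c] [n] f t (n :: acc) from by
            simp [PySem.Chars.replace.go, List.isPrefixOf]]
        rw [ih f (n :: acc) (by simpa using h)]
        simp
      · rw [show PySem.Chars.replace.go [o] [n] (f+1) (c :: t) acc
              = PySem.Chars.replace.go [o] [n] f t (c :: acc) from by
            simp [PySem.Chars.replace.go, List.isPrefixOf, Ne.symm hc]]
        rw [ih f (c :: acc) (by simpa using h)]
        simp [hc]

lemma replace_single (s : List Char) (o n : Char) :
    PySem.Chars.replace s [o] [n] = s.map (fun c => if c = o then n else c) := by
  rw [show PySem.Chars.replace s [o] [n] = PySem.Chars.replace.go [o] [n] s.length s [] from by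
        simp [PySem.Chars.replace]]
  rw [go_single o n s s.length [] (le_refl _)]
  simp

lemma str_replace_single (s : String) (o n : Char) :
    (PySem.Str.replace s (String.ofList [o]) (String.ofList [n])).toList
      = s.toList.map (fun c => if c = o then n else c) := by
  rw [PySem.Str.toList_replace,
    String.toList_ofList, String.toList_ofList,
    replace_single]

set_option maxHeartbeats 1000000 in
theorem legalize_path_spec : Claim_equal_legalize_path := by
  unfold Claim_equal_legalize_path Spec_legalize_path
  intro pth b _
  have hinj : ∀ x y : String, x.toList = y.toList → x = y := by
    intro x y h
    have h2 := congrArg String.ofList h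
    rwa [String.ofList_toList, String.ofList_toList] at h2
  apply hinj
  have e1 : ("\\/" : String).toList = ['\\', '/'] := by decide
  have e2 : (":*?|" : String).toList = [':', '*', '?', '|'] := by decide
  have q : ("\"" : String) = String.ofList ['"'] := by decide
  have q' : ("'" : String) = String.ofList ['\''] := by decide
  have lt : ("<" : String) = String.ofList ['<'] := by decide
  have lb : ("[" : String) = String.ofList ['['] := by decide
  have gt : (">" : String) = String.ofList ['>'] := by decide
  have rb : ("]" : String) = String.ofList [']'] := by decide
  have us : ("_" : String) = String.ofList ['_'] := by decide
  cases b with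
  | false =>
      simp only [legalize_path, legalize_path_alt, Bool.false_eq_true, e2,
        List.foldl_cons, List.foldl_nil]
      rw [if_neg not_false, if_neg not_false]
      rw [q, q', lt, lb, gt, rb, us]
      rw [str_replace_single, str_replace_single, str_replace_single, str_replace_single,
        str_replace_single, str_replace_single, str_replace_single, String.toList_ofList,
        List.map_map, List.map_map, List.map_map, List.map_map, List.map_map, List.map_map]
      refine List.map_congr_left ?_
      intro c _
      simp only [Function.comp]
      rcases eq_or_ne c '"' with h | h1
      · subst h; decide
      rcases eq_or_ne c '<' with h | h2
      · subst h; decide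
      rcases eq_or_ne c '>' with h | h3
      · subst h; decide
      rcases eq_or_ne c ':' with h | h4
      · subst h; decide
      rcases eq_or_ne c '*' with h | h5
      · subst h; decide
      rcases eq_or_ne c '?' with h | h6
      · subst h; decide
      rcases eq_or_ne c '|' with h | h7
      · subst h; decide
      rcases eq_or_ne c '\\' with h | h8
      · subst h; decide
      rcases eq_or_ne c '/' with h | h9
      · subst h; decide
      simp only [PySem.Dict.getD_insert, if_neg h1, if_neg h2, if_neg h3, if_neg h4,
        if_neg h5, if_neg h6, if_neg h7,
        show ∀ x : Char, (⟨[]⟩ : PySem.Dict Char Char).getD x x = x from fun _ => rfl]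
  | true =>
      simp only [legalize_path, legalize_path_alt, e1, e2,
        List.foldl_cons, List.foldl_nil]
      rw [if_pos trivial, if_pos trivial]
      rw [q, q', lt, lb, gt, rb, us]
      rw [str_replace_single, str_replace_single, str_replace_single, str_replace_single,
        str_replace_single, str_replace_single, str_replace_single, str_replace_single,
        str_replace_single, String.toList_ofList,
        List.map_map, List.map_map, List.map_map, List.map_map, List.map_map, List.map_map,
        List.map_map, List.map_map]
      refine List.map_congr_left ?_
      intro c _
      simp only [Function.comp]
      rcases eq_or_ne c '"' with h | h1
      · subst h; decide
      rcases eq_or_ne c '<' with h | h2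
      · subst h; decide
      rcases eq_or_ne c '>' with h | h3
      · subst h; decide
      rcases eq_or_ne c ':' with h | h4
      · subst h; decide
      rcases eq_or_ne c '*' with h | h5
      · subst h; decide
      rcases eq_or_ne c '?' with h | h6
      · subst h; decide
      rcases eq_or_ne c '|' with h | h7
      · subst h; decide
      rcases eq_or_ne c '\\' with h | h8
      · subst h; decide
      rcases eq_or_ne c '/' with h | h9
      · subst h; decide
      simp only [PySem.Dict.getD_insert, if_neg h1, if_neg h2, if_neg h3, if_neg h4,
        if_neg h5, if_neg h6, if_neg h7, if_neg h8, if_neg h9,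
        show ∀ x : Char, (⟨[]⟩ : PySem.Dict Char Char).getD x x = x from fun _ => rfl]
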